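-- pv_equiv track=rewrite | github.com/gancao/PHISDector | standalone_script/PHIS_codon.py | calculate_condon_usage
-- ===== SOURCE A (Python) =====
-- codons = [
--     'AAA', 'AAC', 'AAG', 'AAT', 'ACA', 'ACC', 'ACG', 'ACT',
--     'AGA', 'AGC', 'AGG', 'AGT', 'ATA', 'ATC', 'ATG', 'ATT',
--     'CAA', 'CAC', 'CAG', 'CAT', 'CCA', 'CCC', 'CCG', 'CCT',
--     'CGA', 'CGC', 'CGG', 'CGT', 'CTA', 'CTC', 'CTG', 'CTT',
--     'GAA', 'GAC', 'GAG', 'GAT', 'GCA', 'GCC', 'GCG', 'GCT',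
--     'GGA', 'GGC', 'GGG', 'GGT', 'GTA', 'GTC', 'GTG', 'GTT',
--     'TAA', 'TAC', 'TAG', 'TAT', 'TCA', 'TCC', 'TCG', 'TCT',
--     'TGA', 'TGC', 'TGG', 'TGT', 'TTA', 'TTC', 'TTG', 'TTT'
-- ]
--
-- def calculate_condon_usage(condon_usage_dict,code_region_sequence):
-- 	i =0
-- 	condon_num = 0
-- 	while i<len(code_region_sequence):
-- 		condon = code_region_sequence[i:i+3].upper()
-- 		i = i+3
-- 		if condon not in codons:
-- 			continue
-- 		condon_num = condon_num+1
-- 		if condon not in condon_usage_dict.keys():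
-- 			condon_usage_dict.update({condon:0})
-- 		condon_usage_dict[condon] = condon_usage_dict[condon] +1
-- 	return condon_num
-- ===== SOURCE B (Python) =====
-- codons = [
--     'AAA', 'AAC', 'AAG', 'AAT', 'ACA', 'ACC', 'ACG', 'ACT',
--     'AGA', 'AGC', 'AGG', 'AGT', 'ATA', 'ATC', 'ATG', 'ATT',
--     'CAA', 'CAC', 'CAG', 'CAT', 'CCA', 'CCC', 'CCG', 'CCT',
--     'CGA', 'CGC', 'CGG', 'CGT', 'CTA', 'CTC', 'CTG', 'CTT',
--     'GAA', 'GAC', 'GAG', 'GAT', 'GCA', 'GCC', 'GCG', 'GCT',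
--     'GGA', 'GGC', 'GGG', 'GGT', 'GTA', 'GTC', 'GTG', 'GTT',
--     'TAA', 'TAC', 'TAG', 'TAT', 'TCA', 'TCC', 'TCG', 'TCT',
--     'TGA', 'TGC', 'TGG', 'TGT', 'TTA', 'TTC', 'TTG', 'TTT'
-- ]
--
-- def calculate_condon_usage(condon_usage_dict, code_region_sequence):
--     # chunk the sequence once
--     triples = [code_region_sequence[i:i + 3].upper()
--                for i in range(0, len(code_region_sequence), 3)]
--     # then iterate the 64-codon KEY SPACE: one count per codon
--     total = 0
--     for codon in codons:
--         n = triples.count(codon)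
--         if n:
--             condon_usage_dict[codon] = condon_usage_dict.get(codon, 0) + n
--             total += n
--     return total
-- ===== Notes on version B (the rewrite author's own statement) =====
-- stated objective: alternative
-- what changed: A makes one interleaved pass over the sequence (slice, membership test in the 64-entry list, mutate the caller's dict, bump the counter inside one while-loop); B inverts the traversal: it chunks the sequence once, then iterates the 64-codon key space, counting each codon's occurrences among the chunks with list.count and merging each nonzero tally into the caller's dict, returning the sum of the per-codon counts.
import Mathlib
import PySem

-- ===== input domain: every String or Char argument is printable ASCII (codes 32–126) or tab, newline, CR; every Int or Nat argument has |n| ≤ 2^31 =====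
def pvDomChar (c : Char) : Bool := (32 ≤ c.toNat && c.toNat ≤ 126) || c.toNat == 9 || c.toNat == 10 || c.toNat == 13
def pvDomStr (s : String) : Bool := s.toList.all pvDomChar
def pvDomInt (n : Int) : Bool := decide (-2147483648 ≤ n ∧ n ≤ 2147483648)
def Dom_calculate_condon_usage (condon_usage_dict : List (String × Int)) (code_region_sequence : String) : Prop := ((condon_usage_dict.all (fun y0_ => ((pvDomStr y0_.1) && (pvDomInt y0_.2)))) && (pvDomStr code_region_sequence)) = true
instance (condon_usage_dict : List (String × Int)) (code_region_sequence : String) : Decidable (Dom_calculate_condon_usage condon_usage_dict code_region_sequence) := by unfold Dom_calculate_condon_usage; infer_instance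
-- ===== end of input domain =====

-- B inverts the traversal: chunk the sequence once, then iterate the 64-codon key space,
-- one list.count per codon (alternative decomposition, same cost).  Both versions mutate
-- condon_usage_dict to the same final mapping, but B inserts new keys in codon-table order
-- where A inserts them in first-occurrence order; the theorems below are about the RETURN value.

-- ===== PORT A =====
def codonsL : List String := [
  "AAA", "AAC", "AAG", "AAT", "ACA", "ACC", "ACG", "ACT",
  "AGA", "AGC", "AGG", "AGT", "ATA", "ATC", "ATG", "ATT",
  "CAA", "CAC", "CAG", "CAT", "CCA", "CCC", "CCG", "CCT",
  "CGA", "CGC", "CGG", "CGT", "CTA", "CTC", "CTG", "CTT",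
  "GAA", "GAC", "GAG", "GAT", "GCA", "GCC", "GCG", "GCT",
  "GGA", "GGC", "GGG", "GGT", "GTA", "GTC", "GTG", "GTT",
  "TAA", "TAC", "TAG", "TAT", "TCA", "TCC", "TCG", "TCT",
  "TGA", "TGC", "TGG", "TGT", "TTA", "TTC", "TTG", "TTT"]

-- A's while loop over the index i (step 3): recursion over the remaining characters
-- (s[i:i+3] = take 3 of the remainder; the slice clamps exactly like take).
-- After the `update({condon:0})` guard the key is present, so Python's
-- condon_usage_dict[condon] is exactly getD condon 0 here.
def goA : List Char → PySem.Dict String Int → Int → Int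
  | [], _, num => num
  | c :: cs, d, num =>
    let condon : String := String.ofList (PySem.Chars.upper ((c :: cs).take 3))
    if condon ∈ codonsL then
      let d1 := if d.contains condon then d else d.insert condon 0
      goA (cs.drop 2) (d1.insert condon (d1.getD condon 0 + 1)) (num + 1)
    else
      goA (cs.drop 2) d num
termination_by cs => cs.length
decreasing_by all_goals (simp [List.length_drop]; try omega)

def calculate_condon_usage (condon_usage_dict : List (String × Int)) (code_region_sequence : String) : Int :=
  goA code_region_sequence.toList (PySem.Dict.mk condon_usage_dict) 0

-- ===== PORT B =====
-- the comprehension [seq[i:i+3].upper() for i in range(0, len(seq), 3)]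
def chunks3 : List Char → List String
  | [] => []
  | c :: cs => String.ofList (PySem.Chars.upper ((c :: cs).take 3)) :: chunks3 (cs.drop 2)
termination_by cs => cs.length
decreasing_by simp [List.length_drop]; try omega

-- the for-loop over codons: state = (caller's dict, total)
def calculate_condon_usage_alt (condon_usage_dict : List (String × Int)) (code_region_sequence : String) : Int :=
  let triples := chunks3 code_region_sequence.toList
  (codonsL.foldl
    (fun (st : PySem.Dict String Int × Int) codon =>
      let n : Nat := PySem.List.count triples codon
      if n ≠ 0 then (st.1.insert codon (st.1.getD codon 0 + (n : Int)), st.2 + (n : Int)) else st)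
    (PySem.Dict.mk condon_usage_dict, 0)).2

-- ===== PRECONDITION & SPEC =====
def Spec_calculate_condon_usage (condon_usage_dict : List (String × Int)) (code_region_sequence : String) (out : Int) : Prop := out = calculate_condon_usage_alt condon_usage_dict code_region_sequence
instance (condon_usage_dict : List (String × Int)) (code_region_sequence : String) (out : Int) : Decidable (Spec_calculate_condon_usage condon_usage_dict code_region_sequence out) := by unfold Spec_calculate_condon_usage; infer_instance

-- ===== CLAIM =====
def Claim_equal_calculate_condon_usage : Prop := ∀ (condon_usage_dict : List (String × Int)) (code_region_sequence : String), Dom_calculate_condon_usage condon_usage_dict code_region_sequence → Spec_calculate_condon_usage condon_usage_dict code_region_sequence (calculate_condon_usage condon_usage_dict code_region_sequence)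

-- ===== LEMMAS AND PROOFS =====

-- A's loop counts exactly the valid chunks, whatever the dict state is.
lemma goA_eq_countP (cs : List Char) (d : PySem.Dict String Int) (num : Int) :
    goA cs d num = num + ((chunks3 cs).filter (fun t => decide (t ∈ codonsL))).length := by
  induction cs, d, num using goA.induct with
  | case1 d num => simp [goA, chunks3]
  | case2 c cs d num condon hmem d1 ih =>
      rw [goA, chunks3]
      rw [if_pos hmem]
      refine ih.trans ?_
      rw [List.filter_cons, decide_eq_true hmem]
      simp
      omega
  | case3 c cs d num condon hmem ih =>
      rw [goA, chunks3]
      rw [if_neg hmem, ih]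
      rw [List.filter_cons, decide_eq_false hmem]
      simp

-- B's fold: the running total accumulates one count per key, whatever the dict does.
lemma foldB_snd (ts : List String) (ks : List String) (d : PySem.Dict String Int) (tot : Int) :
    (ks.foldl
      (fun (st : PySem.Dict String Int × Int) codon =>
        let n : Nat := PySem.List.count ts codon
        if n ≠ 0 then (st.1.insert codon (st.1.getD codon 0 + (n : Int)), st.2 + (n : Int)) else st)
      (d, tot)).2
    = tot + ((ks.map (fun k => (List.count k ts : Int))).sum) := by
  induction ks generalizing d tot with
  | nil => simp
  | cons k ks ih =>
      simp only [List.foldl_cons, List.map_cons, List.sum_cons]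
      by_cases h : PySem.List.count ts k ≠ 0
      · rw [if_pos h, ih]; rw [PySem.List.count_eq]; ring
      · rw [if_neg h, ih]
        have : List.count k ts = 0 := by
          have := PySem.List.count_eq ts k; omega
        rw [this]; push_cast; ring

-- membership in k :: ks splits into (= k) plus (∈ ks) when k ∉ ks
lemma filter_mem_cons_length (ts : List String) (k : String) (ks : List String) (hk : k ∉ ks) :
    (ts.filter (fun t => decide (t ∈ k :: ks))).length
      = ts.count k + (ts.filter (fun t => decide (t ∈ ks))).length := by
  induction ts with
  | nil => simp
  | cons t ts iht =>
      simp only [List.mem_cons, Bool.decide_or] at iht ⊢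
      by_cases htk : t = k
      · subst htk
        simp [hk, iht]
        omega
      · by_cases hts : t ∈ ks
        · simp [htk, hts, iht]
          omega
        · simp [htk, hts, iht]

-- per-key counts over a duplicate-free key list sum to the number of elements hitting the list
lemma sum_counts_eq_filter_length (ts : List String) (ks : List String) (hks : ks.Nodup) :
    ((ks.map (fun k => (List.count k ts : Int))).sum)
      = ((ts.filter (fun t => decide (t ∈ ks))).length : Int) := by
  induction ks with
  | nil => simp
  | cons k ks ih =>
      have hk : k ∉ ks := (List.nodup_cons.mp hks).1
      have hnd : ks.Nodup := (List.nodup_cons.mp hks).2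
      simp only [List.map_cons, List.sum_cons, ih hnd]
      rw [filter_mem_cons_length ts k ks hk]
      push_cast; ring

lemma codonsL_nodup : codonsL.Nodup := by decide

-- ===== VERDICT =====
theorem calculate_condon_usage_spec : Claim_equal_calculate_condon_usage := by
  intro d s _
  unfold Spec_calculate_condon_usage calculate_condon_usage calculate_condon_usage_alt
  rw [goA_eq_countP, foldB_snd, sum_counts_eq_filter_length _ _ codonsL_nodup]
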